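-- pv_equiv track=rewrite | github.com/mariolciax/Thue_online_play_gra_kombinatoryczna | abelowe_repetycje.py | sprawdz_abel
-- ===== SOURCE A (Python) =====
-- import math
--
-- def sprawdz_abelowo(slowo, alfabet):  # sprawdzanie repetycji abelowych juz w konkretnych podslowach
--     n = len(slowo)
--     p = int(n / 2)
--     a = len(alfabet)
--     wystapienia_1 = [0 * i for i in range(0, a)]
--     wystapienia_2 = [0 * i for i in range(0, a)]
--     for i in range(0, a):
--         for j in range(0, p):
--             if slowo[j] == alfabet[i]:
--                 wystapienia_1[i] = wystapienia_1[i] + 1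
--         for k in range(p, n):
--             if slowo[k] == alfabet[i]:
--                 wystapienia_2[i] = wystapienia_2[i] + 1  # a.count(x) liczba wystapien elementu x na liscie
--     for g in range(0, a):
--         if wystapienia_1[g] != wystapienia_2[g]:
--             return 0
--     return 1
--
-- def sprawdz_abel(slowo, alfabet):  # przeszukiwanie calego slowa pod wzgledem repetycji abelowych
--     n = len(slowo)
--     m = math.floor(n / 2)
--     for k in range(1, m + 1):
--         w = n - 1 - 2 * (k - 1)  # liczba podslow dlugosci k do sprawdzenia
--         for j in range(0, w):
--             if sprawdz_abelowo(slowo[j:j + 2 * k], alfabet) == 1: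
--                 return 1
--     return 0
-- ===== SOURCE B (Python) =====
-- def sprawdz_abel(slowo, alfabet):
--     # Prefix-count tables: one cumulative-count array per distinct alphabet letter,
--     # then each window's two halves are compared in O(a) via three table lookups.
--     n = len(slowo)
--     letters = []
--     for c in alfabet:
--         if c not in letters:
--             letters.append(c)
--     pref = []
--     for c in letters:
--         s = 0
--         arr = [0]
--         for ch in slowo:
--             if ch == c:
--                 s += 1
--             arr.append(s)
--         pref.append(arr)
--     for k in range(1, n // 2 + 1):
--         for j in range(n - 2 * k + 1):
--             if all(2 * arr[j + k] == arr[j] + arr[j + 2 * k] for arr in pref):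
--                 return 1
--     return 0
-- ===== Notes on version B (the rewrite author's own statement) =====
-- stated objective: faster
-- what changed: Replaces per-window letter-count rescans (a helper scanning each window once per alphabet letter) by once-built per-letter prefix-count tables, so each window's two halves are compared with three table lookups per letter.
import Mathlib
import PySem

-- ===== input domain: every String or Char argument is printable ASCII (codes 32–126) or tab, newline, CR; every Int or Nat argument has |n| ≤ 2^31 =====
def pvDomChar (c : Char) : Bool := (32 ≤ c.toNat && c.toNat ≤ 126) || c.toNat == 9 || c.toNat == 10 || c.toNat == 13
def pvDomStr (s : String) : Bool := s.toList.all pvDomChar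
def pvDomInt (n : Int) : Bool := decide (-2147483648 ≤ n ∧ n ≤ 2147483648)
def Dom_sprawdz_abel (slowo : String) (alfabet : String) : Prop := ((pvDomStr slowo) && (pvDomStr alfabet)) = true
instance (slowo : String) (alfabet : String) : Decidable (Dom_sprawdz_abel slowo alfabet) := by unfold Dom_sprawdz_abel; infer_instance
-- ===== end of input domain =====

-- B replaces A's per-window per-letter rescans by per-letter prefix-count tables built once,
-- comparing each window's halves with three table lookups per letter (objective: faster).

-- ===== PORT A =====
-- body of both inner counting loops of sprawdz_abelowo: 'if slowo[j] == alfabet[i]: wyst[i] += 1'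
-- (both indices are always in range here, so List.getD is exact for the Python indexing)
def pvCountStep (chars alf : List Char) (i : Nat) (w : List Int) (j : Nat) : List Int :=
  if chars.getD j ' ' = alf.getD i ' ' then w.set i (w.getD i 0 + 1) else w

-- final loop of sprawdz_abelowo: 'for g in range(0, a): if w1[g] != w2[g]: return 0' then 'return 1'
def pvCheck (w1 w2 : List Int) : List Nat → Int
  | [] => 1
  | g :: rest => if w1.getD g 0 ≠ w2.getD g 0 then 0 else pvCheck w1 w2 rest

def pvAbelowoCore (chars alf : List Char) : Int :=
  let n := chars.length
  let p := n / 2            -- int(n/2) with n = len(slowo) ≥ 0 (exact: n < 2^53)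
  let a := alf.length
  let w0 : List Int × List Int :=
    ((List.range a).map (fun (i : Nat) => (0 : Int) * (i : Int)), (List.range a).map (fun (i : Nat) => (0 : Int) * (i : Int)))
  -- 'for i in range(0, a):' with inner loops 'for j in range(0, p)' and 'for k in range(p, n)'
  let w := (List.range a).foldl (fun st i =>
      ((List.range' 0 p).foldl (pvCountStep chars alf i) st.1,
       (List.range' p (n - p)).foldl (pvCountStep chars alf i) st.2)) w0
  pvCheck w.1 w.2 (List.range a)

def sprawdz_abelowo (slowo : String) (alfabet : String) : Int :=
  pvAbelowoCore slowo.toList alfabet.toList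

-- 'for j in range(0, w): if sprawdz_abelowo(slowo[j:j+2*k], alfabet) == 1: return 1'
-- (slowo[j:j+2*k] = (chars.drop j).take (2*k) by PySem.List.slice_natCast_add)
def pvAInner (chars : List Char) (alfabet : String) (k : Nat) : List Nat → Bool
  | [] => false
  | j :: rest =>
      if sprawdz_abelowo (String.ofList ((chars.drop j).take (2 * k))) alfabet = 1 then true
      else pvAInner chars alfabet k rest

-- 'for k in range(1, m+1): w = n - 1 - 2*(k-1); …'; for every k ≤ n/2 reached here
-- w = n + 1 - 2*k > 0, so the Nat form of w is exact
def pvAOuter (chars : List Char) (alfabet : String) (n : Nat) : List Nat → Int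
  | [] => 0
  | k :: rest =>
      if pvAInner chars alfabet k (List.range (n + 1 - 2 * k)) then 1 else
      pvAOuter chars alfabet n rest

def sprawdz_abel (slowo : String) (alfabet : String) : Int :=
  let n := slowo.toList.length
  let m := n / 2            -- math.floor(n/2)
  pvAOuter slowo.toList alfabet n (List.range' 1 m)

-- ===== PORT B =====
-- 's = 0; arr = [0]; for ch in slowo: s += (ch == c); arr.append(s)' — prefix counts of letter c
def pvPrefixArr (chars : List Char) (c : Char) : List Int :=
  (chars.foldl (fun (st : Int × List Int) ch =>
      let s := if ch = c then st.1 + 1 else st.1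
      (s, st.2 ++ [s])) ((0 : Int), [(0 : Int)])).2

-- 'for j in range(n - 2*k + 1): if all(2*arr[j+k] == arr[j] + arr[j+2*k] for arr in pref): return 1'
def pvBInner (pref : List (List Int)) (k : Nat) : List Nat → Bool
  | [] => false
  | j :: rest =>
      if pref.all (fun arr => 2 * arr.getD (j + k) 0 == arr.getD j 0 + arr.getD (j + 2 * k) 0)
      then true else pvBInner pref k rest

def pvBOuter (pref : List (List Int)) (n : Nat) : List Nat → Int
  | [] => 0
  | k :: rest =>
      if pvBInner pref k (List.range (n - 2 * k + 1)) then 1 else pvBOuter pref n rest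

def sprawdz_abel_alt (slowo : String) (alfabet : String) : Int :=
  let chars := slowo.toList
  let n := chars.length
  -- 'letters = []; for c in alfabet: if c not in letters: letters.append(c)' = ordered dedup
  let letters := PySem.List.dedup alfabet.toList
  let pref := letters.map (pvPrefixArr chars)
  pvBOuter pref n (List.range' 1 (n / 2))

-- ===== PRECONDITION & SPEC =====
def Spec_sprawdz_abel (slowo : String) (alfabet : String) (out : Int) : Prop := out = sprawdz_abel_alt slowo alfabet
instance (slowo : String) (alfabet : String) (out : Int) : Decidable (Spec_sprawdz_abel slowo alfabet out) := by unfold Spec_sprawdz_abel; infer_instance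

-- ===== CLAIM (what is proved, stated in full; the proofs are below) =====
def Claim_equal_sprawdz_abel : Prop := ∀ (slowo : String) (alfabet : String), Dom_sprawdz_abel slowo alfabet → Spec_sprawdz_abel slowo alfabet (sprawdz_abel slowo alfabet)

-- ===== LEMMAS AND PROOFS =====

lemma pvBool_eq_of_iff {a b : Bool} (h : (a = true) ↔ (b = true)) : a = b := by
  cases a <;> cases b <;> simp_all

-- counting matches over an index range = counting in the corresponding sublist
lemma pvCountP_range' (chars : List Char) (c : Char) :
    ∀ (q p : Nat), p + q ≤ chars.length →
      (List.range' p q).countP (fun j => chars.getD j ' ' == c)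
        = ((chars.drop p).take q).count c := by
  intro q
  induction q with
  | zero => simp
  | succ q ih =>
    intro p hp
    have hplt : p < chars.length := by omega
    have hgd : chars.getD p ' ' = chars[p] := by
      simp [List.getD_eq_getElem?_getD, hplt]
    rw [List.range'_succ, List.countP_cons, List.drop_eq_getElem_cons hplt,
        List.take_succ_cons, List.count_cons, ih (p + 1) (by omega), hgd]

-- setting a slot to its own value is the identity
lemma pvSet_getD_self (w : List Int) (i : Nat) (h : i < w.length) :
    w.set i (w.getD i 0) = w := by
  apply List.ext_getElem?
  intro g
  rw [List.getElem?_set]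
  split_ifs with h1
  · subst h1; simp [List.getD_eq_getElem?_getD, h]
  · rfl

-- folding pvCountStep over an index list adds the match count at slot i
lemma pvCountStep_foldl (chars alf : List Char) (i : Nat) :
    ∀ (js : List Nat) (w : List Int), i < w.length →
      js.foldl (pvCountStep chars alf i) w
        = w.set i (w.getD i 0 + ((js.countP (fun j => chars.getD j ' ' == alf.getD i ' ')) : Int)) := by
  intro js
  induction js with
  | nil =>
    intro w hw
    simp only [List.foldl_nil, List.countP_nil, Nat.cast_zero, add_zero]
    exact (pvSet_getD_self w i hw).symm
  | cons j rest ih =>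
    intro w hw
    rw [List.foldl_cons]
    by_cases h : chars.getD j ' ' = alf.getD i ' '
    · have hstep : pvCountStep chars alf i w j = w.set i (w.getD i 0 + 1) := by
        unfold pvCountStep; rw [if_pos h]
      have hget : (w.set i (w.getD i 0 + 1)).getD i 0 = w.getD i 0 + 1 := by
        simp [List.getD_eq_getElem?_getD, hw]
      have hb : (chars.getD j ' ' == alf.getD i ' ') = true := beq_iff_eq.mpr h
      have hcnt : (j :: rest).countP (fun j' => chars.getD j' ' ' == alf.getD i ' ')
          = rest.countP (fun j' => chars.getD j' ' ' == alf.getD i ' ') + 1 := by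
        rw [List.countP_cons, hb]
        simp
      rw [hstep, ih _ (by simpa using hw), hget, List.set_set, hcnt]
      push_cast
      ring
    · have hstep : pvCountStep chars alf i w j = w := by
        unfold pvCountStep; rw [if_neg h]
      have hb : (chars.getD j ' ' == alf.getD i ' ') = false := beq_eq_false_iff_ne.mpr h
      have hcnt : (j :: rest).countP (fun j' => chars.getD j' ' ' == alf.getD i ' ')
          = rest.countP (fun j' => chars.getD j' ' ' == alf.getD i ' ') := by
        rw [List.countP_cons, hb]
        simp
      rw [hstep, ih _ hw, hcnt]

-- the whole 'for i in range(0, a)' pass, slotwise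
lemma pvFoldAll (chars alf : List Char) (lo len : Nat) :
    ∀ (js : List Nat) (w : List Int), js.Nodup → (∀ i ∈ js, i < w.length) →
      ∀ g, g < w.length →
      (js.foldl (fun w i => (List.range' lo len).foldl (pvCountStep chars alf i) w) w).getD g 0
        = w.getD g 0 + (if g ∈ js
            then (((List.range' lo len).countP (fun j => chars.getD j ' ' == alf.getD g ' ')) : Int)
            else 0) := by
  intro js
  induction js with
  | nil => intro w _ _ g _; simp
  | cons i rest ih =>
    intro w hnd hb g hg
    have hiw : i < w.length := hb i List.mem_cons_self
    rw [List.foldl_cons, pvCountStep_foldl chars alf i _ w hiw]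
    set w' := w.set i (w.getD i 0 + (((List.range' lo len).countP
      (fun j => chars.getD j ' ' == alf.getD i ' ')) : Int)) with hw'
    have hlen : w'.length = w.length := by simp [hw']
    have hrest := ih w' (List.nodup_cons.mp hnd).2
      (fun x hx => by rw [hlen]; exact hb x (List.mem_cons_of_mem _ hx)) g (by omega)
    rw [hrest]
    by_cases hgi : g = i
    · subst hgi
      have hnot : g ∉ rest := (List.nodup_cons.mp hnd).1
      have hself : w'.getD g 0 = w.getD g 0 + (((List.range' lo len).countP
          (fun j => chars.getD j ' ' == alf.getD g ' ')) : Int) := by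
        simp [hw', List.getD_eq_getElem?_getD, hiw]
      rw [hself, if_neg hnot, if_pos List.mem_cons_self]
      ring
    · have hne : w'.getD g 0 = w.getD g 0 := by
        simp [hw', List.getD_eq_getElem?_getD, Ne.symm hgi]
      rw [hne]
      by_cases hgr : g ∈ rest
      · rw [if_pos hgr, if_pos (List.mem_cons_of_mem _ hgr)]
      · rw [if_neg hgr, if_neg (by simp [hgi, hgr])]

lemma pvCheck_eq (w1 w2 : List Int) :
    ∀ gs : List Nat,
      pvCheck w1 w2 gs = if gs.all (fun g => w1.getD g 0 == w2.getD g 0) then 1 else 0 := by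
  intro gs
  induction gs with
  | nil => simp [pvCheck]
  | cons g rest ih =>
    by_cases h : w1.getD g 0 = w2.getD g 0 <;> simp [pvCheck, ih] <;> split_ifs <;> simp_all

-- the 'for i' loop updates the two count lists independently
lemma pvFoldPair (chars alf : List Char) (p n : Nat) :
    ∀ (js : List Nat) (w1 w2 : List Int),
      js.foldl (fun st i => ((List.range' 0 p).foldl (pvCountStep chars alf i) st.1,
          (List.range' p (n - p)).foldl (pvCountStep chars alf i) st.2)) (w1, w2)
        = (js.foldl (fun w i => (List.range' 0 p).foldl (pvCountStep chars alf i) w) w1,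
           js.foldl (fun w i => (List.range' p (n - p)).foldl (pvCountStep chars alf i) w) w2) := by
  intro js
  induction js with
  | nil => intro w1 w2; rfl
  | cons j rest ih =>
    intro w1 w2
    rw [List.foldl_cons, List.foldl_cons, List.foldl_cons, ih]

-- characterisation of sprawdz_abelowo: 1 iff every alphabet letter occurs equally often in both halves
lemma pvAbelowo_eq (ws alf : List Char) :
    pvAbelowoCore ws alf
      = if ∀ c ∈ alf, (ws.take (ws.length / 2)).count c = (ws.drop (ws.length / 2)).count c
        then 1 else 0 := by
  have h0 : ((List.range alf.length).map (fun (i : Nat) => (0 : Int) * (i : Int)))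
      = List.replicate alf.length (0 : Int) := by
    simp [List.map_const']
  simp only [pvAbelowoCore]
  rw [h0, pvFoldPair ws alf (ws.length / 2) ws.length, pvCheck_eq]
  have hbounds : ∀ i ∈ List.range alf.length, i < (List.replicate alf.length (0 : Int)).length := by
    intro i hi; simpa using List.mem_range.mp hi
  have hW1 : ∀ g, g < alf.length →
      ((List.range alf.length).foldl
        (fun w i => (List.range' 0 (ws.length / 2)).foldl (pvCountStep ws alf i) w)
        (List.replicate alf.length (0 : Int))).getD g 0
      = (((ws.take (ws.length / 2)).count (alf.getD g ' ')) : Int) := by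
    intro g hg
    rw [pvFoldAll ws alf 0 (ws.length / 2) (List.range alf.length)
      (List.replicate alf.length (0 : Int)) List.nodup_range hbounds g (by simpa using hg)]
    rw [pvCountP_range' ws (alf.getD g ' ') (ws.length / 2) 0 (by omega)]
    simp [List.mem_range.mpr hg]
  have hW2 : ∀ g, g < alf.length →
      ((List.range alf.length).foldl
        (fun w i => (List.range' (ws.length / 2) (ws.length - ws.length / 2)).foldl
          (pvCountStep ws alf i) w)
        (List.replicate alf.length (0 : Int))).getD g 0
      = (((ws.drop (ws.length / 2)).count (alf.getD g ' ')) : Int) := by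
    intro g hg
    rw [pvFoldAll ws alf (ws.length / 2) (ws.length - ws.length / 2) (List.range alf.length)
      (List.replicate alf.length (0 : Int)) List.nodup_range hbounds g (by simpa using hg)]
    rw [pvCountP_range' ws (alf.getD g ' ') (ws.length - ws.length / 2) (ws.length / 2) (by omega)]
    rw [List.take_of_length_le (by simp)]
    simp [List.mem_range.mpr hg]
  by_cases hc : ∀ c ∈ alf, (ws.take (ws.length / 2)).count c = (ws.drop (ws.length / 2)).count c
  · rw [if_pos hc, if_pos]
    rw [List.all_eq_true]
    intro g hgmem
    have hg := List.mem_range.mp hgmem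
    have hmem : alf.getD g ' ' ∈ alf := by
      have : alf.getD g ' ' = alf[g] := by simp [List.getD_eq_getElem?_getD, hg]
      rw [this]; exact List.getElem_mem hg
    rw [beq_iff_eq, hW1 g hg, hW2 g hg]
    exact_mod_cast hc _ hmem
  · rw [if_neg hc, if_neg]
    intro hall
    apply hc
    intro c hcmem
    obtain ⟨g, hg, rfl⟩ := List.getElem_of_mem hcmem
    have hgd : alf.getD g ' ' = alf[g] := by simp [List.getD_eq_getElem?_getD, hg]
    have := List.all_eq_true.mp hall g (List.mem_range.mpr hg)
    rw [beq_iff_eq, hW1 g hg, hW2 g hg, hgd] at this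
    exact_mod_cast this

-- loop shapes of the four search loops
lemma pvAInner_eq (chars : List Char) (alfabet : String) (k : Nat) :
    ∀ js, pvAInner chars alfabet k js
      = js.any (fun j => sprawdz_abelowo (String.ofList ((chars.drop j).take (2 * k))) alfabet == 1) := by
  intro js
  induction js with
  | nil => simp [pvAInner]
  | cons j rest ih =>
    by_cases h : sprawdz_abelowo (String.ofList ((chars.drop j).take (2 * k))) alfabet = 1 <;>
      simp [pvAInner, h, ih]

lemma pvAOuter_eq (chars : List Char) (alfabet : String) (n : Nat) :
    ∀ ks, pvAOuter chars alfabet n ks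
      = if ks.any (fun k => pvAInner chars alfabet k (List.range (n + 1 - 2 * k))) then 1 else 0 := by
  intro ks
  induction ks with
  | nil => simp [pvAOuter]
  | cons k rest ih =>
    by_cases h : pvAInner chars alfabet k (List.range (n + 1 - 2 * k)) = true <;>
      simp [pvAOuter, h, ih]

lemma pvBInner_eq (pref : List (List Int)) (k : Nat) :
    ∀ js, pvBInner pref k js
      = js.any (fun j => pref.all
          (fun arr => 2 * arr.getD (j + k) 0 == arr.getD j 0 + arr.getD (j + 2 * k) 0)) := by
  intro js
  induction js with
  | nil => simp [pvBInner]
  | cons j rest ih =>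
    rw [List.any_cons, ← ih]
    cases h : pref.all
        (fun arr => 2 * arr.getD (j + k) 0 == arr.getD j 0 + arr.getD (j + 2 * k) 0)
    · simp only [pvBInner]
      rw [h]
      simp
    · simp only [pvBInner]
      rw [h]
      simp

lemma pvBOuter_eq (pref : List (List Int)) (n : Nat) :
    ∀ ks, pvBOuter pref n ks
      = if ks.any (fun k => pvBInner pref k (List.range (n - 2 * k + 1))) then 1 else 0 := by
  intro ks
  induction ks with
  | nil => simp [pvBOuter]
  | cons k rest ih =>
    by_cases h : pvBInner pref k (List.range (n - 2 * k + 1)) = true <;>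
      simp [pvBOuter, h, ih]

-- the prefix-count fold of B, in closed form
lemma pvPrefixArr_foldl (c : Char) :
    ∀ (l : List Char) (s : Int) (arr : List Int),
      l.foldl (fun (st : Int × List Int) ch =>
          let s' := if ch = c then st.1 + 1 else st.1
          (s', st.2 ++ [s'])) (s, arr)
        = (s + (l.count c : Int),
           arr ++ (List.range l.length).map (fun t => s + ((l.take (t + 1)).count c : Int))) := by
  intro l
  induction l with
  | nil => simp
  | cons ch rest ih =>
    intro s arr
    rw [List.foldl_cons]
    dsimp only
    rw [ih]
    rw [Prod.mk.injEq]
    refine ⟨?_, ?_⟩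
    · by_cases hch : ch = c <;> simp [hch] <;> ring
    · rw [List.length_cons, List.range_succ_eq_map, List.map_cons, List.map_map,
          List.append_assoc, List.singleton_append]
      congr 1
      congr 1
      · by_cases hch : ch = c <;> simp [hch, List.take_succ_cons]
      · apply List.map_congr_left
        intro t _
        simp only [Function.comp_apply, List.take_succ_cons, List.count_cons]
        by_cases hch : ch = c <;> simp [hch] <;> ring

lemma pvPrefixArr_getD (chars : List Char) (c : Char) (t : Nat) (ht : t ≤ chars.length) :
    (pvPrefixArr chars c).getD t 0 = ((chars.take t).count c : Int) := by
  unfold pvPrefixArr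
  rw [pvPrefixArr_foldl]
  cases t with
  | zero => simp
  | succ t' =>
    have ht' : t' < chars.length := by omega
    rw [List.singleton_append, List.getD_cons_succ]
    simp [List.getD_eq_getElem?_getD, List.getElem?_map, List.getElem?_range ht']

-- the per-window conditions of A and B agree
lemma pvPoint_iff (chars : List Char) (alfabet : String) (k j : Nat)
    (hjk : j + 2 * k ≤ chars.length) :
    ((sprawdz_abelowo (String.ofList ((chars.drop j).take (2 * k))) alfabet == 1) = true)
      ↔ (((PySem.List.dedup alfabet.toList).map (pvPrefixArr chars)).all
           (fun arr => 2 * arr.getD (j + k) 0 == arr.getD j 0 + arr.getD (j + 2 * k) 0) = true) := by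
  rw [show sprawdz_abelowo (String.ofList ((chars.drop j).take (2 * k))) alfabet
      = pvAbelowoCore ((chars.drop j).take (2 * k)) alfabet.toList from by
    unfold sprawdz_abelowo
    rw [String.toList_ofList]]
  rw [beq_iff_eq, pvAbelowo_eq]
  have hlen : ((chars.drop j).take (2 * k)).length = 2 * k := by
    rw [List.length_take, List.length_drop]; omega
  rw [hlen, show 2 * k / 2 = k by omega]
  have htake : ((chars.drop j).take (2 * k)).take k = (chars.drop j).take k := by
    rw [List.take_take]; congr 1; omega
  have hdrop : ((chars.drop j).take (2 * k)).drop k = (chars.drop (j + k)).take k := by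
    rw [List.drop_take, List.drop_drop]
    have h1 : 2 * k - k = k := by omega
    rw [h1]
  rw [htake, hdrop]
  rw [List.all_map, List.all_eq_true]
  have hgetD : ∀ (c : Char) (t : Nat), t ≤ chars.length →
      (pvPrefixArr chars c).getD t 0 = ((chars.take t).count c : Int) :=
    fun c t ht => pvPrefixArr_getD chars c t ht
  have e12 : ∀ c : Char,
      (chars.take (j + k)).count c
          = (chars.take j).count c + ((chars.drop j).take k).count c
      ∧ (chars.take (j + 2 * k)).count c
          = (chars.take (j + k)).count c + ((chars.drop (j + k)).take k).count c := by
    intro c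
    constructor
    · rw [List.take_add, List.count_append]
    · rw [show j + 2 * k = (j + k) + k by ring, List.take_add, List.count_append]
  constructor
  · intro h1
    split_ifs at h1 with hcond
    · intro c hcmem
      have hcal : c ∈ alfabet.toList := (PySem.List.mem_dedup _ _).mp hcmem
      simp only [Function.comp_apply]
      rw [beq_iff_eq, hgetD c j (by omega), hgetD c (j + k) (by omega),
          hgetD c (j + 2 * k) (by omega)]
      have he := e12 c
      have hx := hcond c hcal
      omega
    · exact absurd h1 (by norm_num)
  · intro hall
    rw [if_pos]
    intro c hcal
    have := hall c ((PySem.List.mem_dedup _ _).mpr hcal)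
    simp only [Function.comp_apply] at this
    rw [beq_iff_eq, hgetD c j (by omega), hgetD c (j + k) (by omega),
        hgetD c (j + 2 * k) (by omega)] at this
    have he := e12 c
    omega

-- ===== VERDICT (by name: the statement is the Claim_ definition above) =====
theorem sprawdz_abel_spec : Claim_equal_sprawdz_abel := by
  intro slowo alfabet _
  unfold Spec_sprawdz_abel
  simp only [sprawdz_abel, sprawdz_abel_alt]
  rw [pvAOuter_eq, pvBOuter_eq]
  refine congrArg (fun b : Bool => if b then (1 : Int) else 0) (pvBool_eq_of_iff ?_)
  rw [List.any_eq_true, List.any_eq_true]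
  constructor
  · rintro ⟨k, hkmem, hin⟩
    have hk' := List.mem_range'_1.mp hkmem
    have h2k : 2 * k ≤ slowo.toList.length := by omega
    rw [pvAInner_eq, List.any_eq_true] at hin
    obtain ⟨j, hjmem, hP⟩ := hin
    have hj' := List.mem_range.mp hjmem
    refine ⟨k, hkmem, ?_⟩
    rw [pvBInner_eq, List.any_eq_true]
    exact ⟨j, List.mem_range.mpr (by omega),
      (pvPoint_iff slowo.toList alfabet k j (by omega)).mp hP⟩
  · rintro ⟨k, hkmem, hin⟩
    have hk' := List.mem_range'_1.mp hkmem
    have h2k : 2 * k ≤ slowo.toList.length := by omega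
    rw [pvBInner_eq, List.any_eq_true] at hin
    obtain ⟨j, hjmem, hP⟩ := hin
    have hj' := List.mem_range.mp hjmem
    refine ⟨k, hkmem, ?_⟩
    rw [pvAInner_eq, List.any_eq_true]
    exact ⟨j, List.mem_range.mpr (by omega),
      (pvPoint_iff slowo.toList alfabet k j (by omega)).mpr hP⟩
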